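-- pv_equiv track=rewrite | github.com/Fastrings/AdventOfCode | Day 9/day9.py | find_available_space
-- ===== SOURCE A (Python) =====
-- def find_available_space(blocks: list[str], file_position: int, length: int) -> int:
--     for i in range(file_position - length):
--         l = 0
--         j = i
--         while blocks[j] == '.':
--             j += 1
--             l += 1
--             if l == length:
--                 return i
--     return -1
-- ===== SOURCE B (Python) =====
-- # Alternative single-pass algorithm: one left-to-right pass tracking the current run of
-- # consecutive '.' blocks; the first run reaching `length` gives the minimal start,
-- # valid iff start < file_position - length.
-- def find_available_space(blocks: list[str], file_position: int, length: int) -> int: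
--     if length < 1:
--         return -1
--     run = 0
--     for j, b in enumerate(blocks):
--         if b == '.':
--             run += 1
--             if run == length:
--                 start = j - length + 1
--                 return start if start < file_position - length else -1
--         else:
--             run = 0
--     return -1
-- ===== Notes on version B (the rewrite author's own statement) =====
-- stated objective: alternative
-- what changed: A rescans from every candidate start i in range(file_position - length) (restarting the dot count each time); B makes one left-to-right pass over blocks tracking the current run of consecutive '.' blocks and returns the first start whose run reaches length and lies below file_position - length.
import Mathlib
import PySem

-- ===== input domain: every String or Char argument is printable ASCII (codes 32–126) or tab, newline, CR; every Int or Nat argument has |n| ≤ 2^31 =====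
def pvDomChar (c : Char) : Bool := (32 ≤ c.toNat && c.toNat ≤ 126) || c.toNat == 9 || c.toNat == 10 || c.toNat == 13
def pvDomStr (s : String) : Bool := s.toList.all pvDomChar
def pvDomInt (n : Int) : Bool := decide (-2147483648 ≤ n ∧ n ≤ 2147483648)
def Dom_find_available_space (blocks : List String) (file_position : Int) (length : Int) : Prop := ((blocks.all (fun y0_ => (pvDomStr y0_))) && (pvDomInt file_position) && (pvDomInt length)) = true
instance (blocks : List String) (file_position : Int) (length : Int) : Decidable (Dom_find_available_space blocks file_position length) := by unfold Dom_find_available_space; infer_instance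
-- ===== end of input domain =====

-- B replaces A's restart-from-every-start scan by one left-to-right pass over the blocks
-- tracking the current run of '.' blocks (objective: alternative single-pass algorithm).

-- ===== PORT A =====
-- Python's `while blocks[j] == '.'` walked from position j; walking the suffix `blocks.drop j`
-- step for step; `none` = the IndexError Python raises when j runs past the end.
def pvInnerA (rem : List String) (l L : Int) : Option Bool :=
  match rem with
  | [] => none
  | b :: rest => if b = "." then (if l + 1 = L then some true else pvInnerA rest (l + 1) L) else some false

-- `for i in range(stop)` with early return; -2 is dead code standing for the IndexError
-- (unreachable under Pre_).
def pvOuterA (blocks : List String) (L : Int) (i stop : Nat) : Int :=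
  if h : i < stop then
    match pvInnerA (blocks.drop i) 0 L with
    | some true => (i : Int)
    | some false => pvOuterA blocks L (i + 1) stop
    | none => -2
  else -1
termination_by stop - i

def find_available_space (blocks : List String) (file_position : Int) (length : Int) : Int :=
  pvOuterA blocks length 0 (file_position - length).toNat

-- ===== PORT B =====
-- one pass: `for j, b in enumerate(blocks)`, carrying the current dot-run length
def pvBLoop (rest : List String) (L lim : Int) (j : Nat) (run : Int) : Int :=
  match rest with
  | [] => -1
  | b :: rest' =>
    if b = "." then
      (if run + 1 = L then (if (j : Int) - L + 1 < lim then (j : Int) - L + 1 else -1)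
       else pvBLoop rest' L lim (j + 1) (run + 1))
    else pvBLoop rest' L lim (j + 1) 0

def find_available_space_alt (blocks : List String) (file_position : Int) (length : Int) : Int :=
  if length < 1 then -1 else pvBLoop blocks length (file_position - length) 0 0

-- ===== PRECONDITION & SPEC =====
-- length of the leading run of "." blocks (helper for Pre_)
def pvDotRun : List String → Nat
  | [] => 0
  | b :: r => if b = "." then pvDotRun r + 1 else 0

-- Pre_ = exactly the inputs on which A returns (no IndexError): either the scan limit
-- file_position - length stays within the part of the list before the trailing run of '.',
-- or A returns early — the trailing dot run itself is long enough, or some earlier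
-- position starts a run of at least `length` dots.
def Pre_find_available_space (blocks : List String) (file_position : Int) (length : Int) : Prop :=
  file_position - length ≤ ((blocks.length - pvDotRun blocks.reverse : Nat) : Int)
  ∨ (1 ≤ length ∧ ((length ≤ (pvDotRun blocks.reverse : Int))
      ∨ ∃ i < blocks.length - pvDotRun blocks.reverse, length.toNat ≤ pvDotRun (blocks.drop i)))
instance (blocks : List String) (file_position : Int) (length : Int) : Decidable (Pre_find_available_space blocks file_position length) := by unfold Pre_find_available_space; infer_instance

def pvWitness_find_available_space : List String × Int × Int := (["a", ".", ".", "b"], 4, 2)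

def Spec_find_available_space (blocks : List String) (file_position : Int) (length : Int) (out : Int) : Prop := out = find_available_space_alt blocks file_position length
instance (blocks : List String) (file_position : Int) (length : Int) (out : Int) : Decidable (Spec_find_available_space blocks file_position length out) := by unfold Spec_find_available_space; infer_instance

-- ===== CLAIM (what is proved, stated in full; the proofs are below) =====
def Claim_equal_find_available_space : Prop := ∀ (blocks : List String) (file_position : Int) (length : Int), Dom_find_available_space blocks file_position length → Pre_find_available_space blocks file_position length → Spec_find_available_space blocks file_position length (find_available_space blocks file_position length)
-- ===== LEMMAS AND PROOFS =====

-- first start of a run of at least L dots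
def pvFirstWin (L : Nat) : List String → Option Nat
  | [] => none
  | b :: rest => if L ≤ pvDotRun (b :: rest) then some 0 else (pvFirstWin L rest).map (· + 1)

theorem pvDotRun_le_length (l : List String) : pvDotRun l ≤ l.length := by
  induction l with
  | nil => simp [pvDotRun]
  | cons b r ih => simp only [pvDotRun, List.length_cons]; split <;> omega

theorem pvDotRun_eq_length (l : List String) (h : ∀ x ∈ l, x = ".") : pvDotRun l = l.length := by
  induction l with
  | nil => simp [pvDotRun]
  | cons b r ih =>
    have hb : b = "." := h b (by simp)
    have := ih (fun x hx => h x (by simp [hx]))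
    simp [pvDotRun, hb, this]

theorem pvDotRun_all_of_eq_length (l : List String) (h : l.length ≤ pvDotRun l) : ∀ x ∈ l, x = "." := by
  induction l with
  | nil => simp
  | cons b r ih =>
    by_cases hb : b = "."
    · simp only [pvDotRun, hb, if_pos, List.length_cons] at h
      intro x hx
      rcases List.mem_cons.mp hx with h1 | h2
      · simp [h1, hb]
      · exact ih (by omega) x h2
    · exfalso
      simp [pvDotRun, hb] at h

theorem pvDotRun_append_all (a b : List String) (h : ∀ x ∈ a, x = ".") :
    a.length ≤ pvDotRun (a ++ b) := by
  induction a with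
  | nil => simp
  | cons c r ih =>
    have hc : c = "." := h c (by simp)
    have := ih (fun x hx => h x (by simp [hx]))
    simp only [List.cons_append, pvDotRun, hc, if_pos, List.length_cons]
    omega

theorem pvDotRun_take_all (l : List String) : ∀ x ∈ l.take (pvDotRun l), x = "." := by
  induction l with
  | nil => simp
  | cons b r ih =>
    simp only [pvDotRun]
    split
    · next hb =>
      intro x hx
      simp only [List.take_succ_cons, List.mem_cons] at hx
      rcases hx with h1 | h2
      · simp [h1, hb]
      · exact ih x h2
    · simp

-- run starting at k < length - trailing does not reach the end
theorem pvNoRunToEnd (blocks : List String) (k : Nat)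
    (hk : k < blocks.length - pvDotRun blocks.reverse) :
    pvDotRun (blocks.drop k) < (blocks.drop k).length := by
  by_contra hcon
  push_neg at hcon
  have hall : ∀ x ∈ blocks.drop k, x = "." := pvDotRun_all_of_eq_length _ hcon
  have : (blocks.drop k).reverse.length ≤ pvDotRun ((blocks.drop k).reverse ++ (blocks.take k).reverse) := by
    apply pvDotRun_append_all
    intro x hx
    exact hall x (List.mem_reverse.mp hx)
  rw [← List.reverse_append, List.take_append_drop] at this
  simp only [List.length_reverse, List.length_drop] at this
  omega

-- the trailing pvDotRun blocks.reverse entries of blocks are all "."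
theorem pvTrailingAll (blocks : List String) :
    ∀ x ∈ blocks.drop (blocks.length - pvDotRun blocks.reverse), x = "." := by
  intro x hx
  have ht : pvDotRun blocks.reverse ≤ blocks.length := by
    have := pvDotRun_le_length blocks.reverse
    simpa using this
  have hrev : x ∈ (blocks.drop (blocks.length - pvDotRun blocks.reverse)).reverse :=
    List.mem_reverse.mpr hx
  rw [List.reverse_drop] at hrev
  have hlen : blocks.length - (blocks.length - pvDotRun blocks.reverse) = pvDotRun blocks.reverse := by omega
  rw [hlen] at hrev
  exact pvDotRun_take_all blocks.reverse x hrev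

theorem pvInnerA_spec (rem : List String) (l L : Int) :
    pvInnerA rem l L =
      if 1 ≤ L - l ∧ (L - l).toNat ≤ pvDotRun rem then some true
      else if pvDotRun rem < rem.length then some false
      else none := by
  induction rem generalizing l with
  | nil =>
    simp only [pvInnerA, pvDotRun, List.length_nil]
    rw [if_neg (by omega), if_neg (by omega)]
  | cons b rest ih =>
    by_cases hb : b = "."
    · have hdr : pvDotRun (b :: rest) = pvDotRun rest + 1 := by simp [pvDotRun, hb]
      have hinner : pvInnerA (b :: rest) l L =
          (if l + 1 = L then some true else pvInnerA rest (l + 1) L) := by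
        simp [pvInnerA, hb]
      rw [hinner, hdr, List.length_cons]
      by_cases hL : l + 1 = L
      · rw [if_pos hL, if_pos (by constructor <;> omega)]
      · rw [if_neg hL, ih]
        split_ifs with c1 c2 c3 c4 <;> first | rfl | omega
    · have hdr : pvDotRun (b :: rest) = 0 := by simp [pvDotRun, hb]
      have hinner : pvInnerA (b :: rest) l L = some false := by simp [pvInnerA, hb]
      rw [hinner, hdr, List.length_cons]
      rw [if_neg (by omega), if_pos (by omega)]

theorem pvOuterA_all_false (blocks : List String) (L : Int) (i stop : Nat)
    (h : ∀ k, i ≤ k → k < stop → pvInnerA (blocks.drop k) 0 L = some false) :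
    pvOuterA blocks L i stop = -1 := by
  induction hn : stop - i generalizing i with
  | zero => rw [pvOuterA]; rw [dif_neg (by omega)]
  | succ m ih =>
    rw [pvOuterA]
    by_cases hi : i < stop
    · rw [dif_pos hi, h i le_rfl hi]
      exact ih (i + 1) (fun k hk1 hk2 => h k (by omega) hk2) (by omega)
    · rw [dif_neg hi]

theorem pvOuterA_ret (blocks : List String) (L : Int) (i stop i0 : Nat)
    (hii : i ≤ i0) (his : i0 < stop)
    (ht : pvInnerA (blocks.drop i0) 0 L = some true)
    (hf : ∀ k, i ≤ k → k < i0 → pvInnerA (blocks.drop k) 0 L = some false) :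
    pvOuterA blocks L i stop = (i0 : Int) := by
  induction hn : i0 - i generalizing i with
  | zero =>
    have : i = i0 := by omega
    subst this
    rw [pvOuterA, dif_pos his, ht]
  | succ m ih =>
    rw [pvOuterA, dif_pos (by omega), hf i le_rfl (by omega)]
    exact ih (i + 1) (by omega) (fun k hk1 hk2 => hf k (by omega) hk2) (by omega)

theorem pvFirstWin_some (L : Nat) (l : List String) (i0 : Nat) (h : pvFirstWin L l = some i0) :
    L ≤ pvDotRun (l.drop i0) ∧ ∀ k, k < i0 → pvDotRun (l.drop k) < L := by
  induction l generalizing i0 with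
  | nil => simp [pvFirstWin] at h
  | cons b rest ih =>
    simp only [pvFirstWin] at h
    split at h
    · next hw =>
      obtain rfl : i0 = 0 := by simpa using h.symm
      exact ⟨by simpa using hw, by omega⟩
    · next hw =>
      rcases Option.map_eq_some_iff.mp h with ⟨j, hj, rfl⟩
      obtain ⟨h1, h2⟩ := ih j hj
      refine ⟨by simpa using h1, ?_⟩
      intro k hk
      cases k with
      | zero => simpa using Nat.lt_of_not_le hw
      | succ k' => simpa using h2 k' (by omega)

theorem pvFirstWin_none (L : Nat) (l : List String) (h : pvFirstWin L l = none) (hL : 1 ≤ L) :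
    ∀ k, pvDotRun (l.drop k) < L := by
  induction l with
  | nil => intro k; simpa [pvDotRun] using hL
  | cons b rest ih =>
    simp only [pvFirstWin] at h
    split at h
    · exact absurd h (by simp)
    · next hw =>
      intro k
      cases k with
      | zero => simpa using Nat.lt_of_not_le hw
      | succ k' => exact ih (by simpa using h) k'

theorem pvDotRun_replicate_append (m : Nat) (b : String) (rest : List String) (hb : b ≠ ".") :
    pvDotRun (List.replicate m "." ++ b :: rest) = m := by
  induction m with
  | zero => simp [pvDotRun, hb]
  | succ m ih => simpa [List.replicate_succ, pvDotRun] using ih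

theorem pvDotRun_replicate (m : Nat) : pvDotRun (List.replicate m ".") = m := by
  rw [pvDotRun_eq_length _ (fun x hx => List.eq_of_mem_replicate hx), List.length_replicate]

theorem pvRepShift (rn : Nat) (rest : List String) :
    List.replicate rn "." ++ "." :: rest = "." :: (List.replicate rn "." ++ rest) := by
  induction rn with
  | zero => rfl
  | succ k ih => simp only [List.replicate_succ, List.cons_append, ih]

theorem pvFirstWin_replicate_none (L m : Nat) (h : m < L) :
    pvFirstWin L (List.replicate m ".") = none := by
  induction m with
  | zero => rfl
  | succ k ih =>
    rw [List.replicate_succ]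
    simp only [pvFirstWin]
    rw [if_neg (by rw [← List.replicate_succ, pvDotRun_replicate]; omega), ih (by omega)]
    rfl

theorem pvFirstWin_skip (L : Nat) (rn : Nat) (b : String) (rest : List String)
    (hb : b ≠ ".") (hr : rn < L) :
    pvFirstWin L (List.replicate rn "." ++ b :: rest) =
      (pvFirstWin L rest).map (· + (rn + 1)) := by
  induction rn with
  | zero =>
    simp only [List.replicate_zero, List.nil_append, pvFirstWin]
    rw [if_neg (by rw [show pvDotRun (b :: rest) = 0 from by simp [pvDotRun, hb]]; omega)]
  | succ k ih =>
    rw [List.replicate_succ, List.cons_append]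
    simp only [pvFirstWin]
    rw [if_neg (by
      rw [show pvDotRun ("." :: (List.replicate k "." ++ b :: rest)) =
            pvDotRun (List.replicate k "." ++ b :: rest) + 1 from by simp [pvDotRun]]
      rw [pvDotRun_replicate_append k b rest hb]
      omega)]
    rw [ih (by omega)]
    cases pvFirstWin L rest with
    | none => rfl
    | some j => simp only [Option.map_some]; congr 1

theorem pvBLoop_spec (rest : List String) (L lim : Int) (hL : 1 ≤ L) :
    ∀ (j rn : Nat), (rn : Int) < L →
    pvBLoop rest L lim j (rn : Int) =
      match pvFirstWin L.toNat (List.replicate rn "." ++ rest) with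
      | some i0 => if (j : Int) - rn + i0 < lim then (j : Int) - rn + i0 else -1
      | none => -1 := by
  induction rest with
  | nil =>
    intro j rn hrn
    rw [List.append_nil, pvFirstWin_replicate_none L.toNat rn (by omega)]
    rfl
  | cons b rest' ih =>
    intro j rn hrn
    by_cases hb : b = "."
    · subst hb
      rw [pvRepShift]
      by_cases hrL : (rn : Int) + 1 = L
      · have hfw : pvFirstWin L.toNat ("." :: (List.replicate rn "." ++ rest')) = some 0 := by
          simp only [pvFirstWin]
          rw [if_pos (by
            have h1 : rn ≤ pvDotRun (List.replicate rn "." ++ rest') := by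
              have := pvDotRun_append_all (List.replicate rn ".") rest'
                (fun x hx => List.eq_of_mem_replicate hx)
              simpa using this
            have h2 : pvDotRun ("." :: (List.replicate rn "." ++ rest')) =
                pvDotRun (List.replicate rn "." ++ rest') + 1 := by simp [pvDotRun]
            omega)]
        rw [hfw]
        simp only [pvBLoop, reduceIte]
        rw [if_pos hrL]
        rw [show (j : Int) - L + 1 = (j : Int) - rn + ((0 : Nat) : Int) from by push_cast; omega]
      · simp only [pvBLoop, reduceIte]
        rw [if_neg hrL]
        rw [show ((rn : Int) + 1) = ((rn + 1 : Nat) : Int) from by push_cast; ring]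
        rw [ih (j + 1) (rn + 1) (by push_cast; omega)]
        rw [show List.replicate (rn + 1) "." ++ rest' = "." :: (List.replicate rn "." ++ rest')
            from by rw [List.replicate_succ, List.cons_append]]
        rcases pvFirstWin L.toNat ("." :: (List.replicate rn "." ++ rest')) with _ | i0
        · rfl
        · push_cast
          split_ifs <;> first | omega | (push_cast; ring)
    · simp only [pvBLoop]
      rw [if_neg hb]
      have hih := ih (j + 1) 0 (by omega)
      simp only [Nat.cast_zero, List.replicate_zero, List.nil_append] at hih
      rw [hih]
      rw [pvFirstWin_skip L.toNat rn b rest' hb (by omega)]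
      rcases pvFirstWin L.toNat rest' with _ | i0
      · rfl
      · simp only [Option.map_some]
        push_cast
        split_ifs <;> first | omega | (push_cast; ring)

-- top-level form of B
theorem pvAltEq (blocks : List String) (fp L : Int) (hL : 1 ≤ L) :
    find_available_space_alt blocks fp L =
      match pvFirstWin L.toNat blocks with
      | some i0 => if (i0 : Int) < fp - L then (i0 : Int) else -1
      | none => -1 := by
  unfold find_available_space_alt
  rw [if_neg (by omega)]
  have := pvBLoop_spec blocks L (fp - L) hL 0 0 (by omega)
  simp only [Nat.cast_zero, List.replicate_zero, List.nil_append] at this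
  rw [this]
  rcases pvFirstWin L.toNat blocks with _ | i0
  · rfl
  · simp

-- ===== VERDICT (by name: the statement is the Claim_ definition above) =====
theorem find_available_space_spec : Claim_equal_find_available_space := by
  intro blocks fp L _hdom hpre
  unfold Spec_find_available_space
  unfold find_available_space
  set n := blocks.length with hn
  set t := pvDotRun blocks.reverse with htdef
  have htn : t ≤ n := by
    have := pvDotRun_le_length blocks.reverse
    simpa [htdef, hn] using this
  by_cases hL : 1 ≤ L
  case neg =>
    -- length < 1: A scans and never returns early; B returns -1 immediately
    have hlim : fp - L ≤ ((n - t : Nat) : Int) := by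
      rcases hpre with h | ⟨h1, _⟩
      · exact h
      · omega
    rw [pvOuterA_all_false]
    · unfold find_available_space_alt
      rw [if_pos (by omega)]
    · intro k _ hk2
      have hks : k < n - t := by omega
      rw [pvInnerA_spec]
      rw [if_neg (by omega), if_pos (pvNoRunToEnd blocks k hks)]
  case pos =>
    rw [pvAltEq blocks fp L hL]
    rcases hfw : pvFirstWin L.toNat blocks with _ | i0
    · -- no run of length L anywhere: both -1
      have hnone := pvFirstWin_none L.toNat blocks hfw (by omega)
      have hlim : fp - L ≤ ((n - t : Nat) : Int) := by
        rcases hpre with h | ⟨_, h | ⟨i, hi1, hi2⟩⟩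
        · exact h
        · -- trailing run long enough: contradiction with no window at n - t
          exfalso
          have hall := pvTrailingAll blocks
          have : pvDotRun (blocks.drop (n - t)) = t := by
            rw [pvDotRun_eq_length _ hall, List.length_drop]
            omega
          have := hnone (n - t)
          omega
        · exact absurd hi2 (by have := hnone i; omega)
      rw [pvOuterA_all_false]
      intro k _ hk2
      have hks : k < n - t := by omega
      rw [pvInnerA_spec]
      rw [if_neg (by have := hnone k; omega), if_pos (pvNoRunToEnd blocks k hks)]
    · -- first window at i0
      obtain ⟨hwin, hmin⟩ := pvFirstWin_some L.toNat blocks i0 hfw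
      have hi0n : i0 < n := by
        have h1 := pvDotRun_le_length (blocks.drop i0)
        rw [List.length_drop] at h1
        omega
      have hfalse : ∀ k, k < i0 → pvInnerA (blocks.drop k) 0 L = some false := by
        intro k hk
        rw [pvInnerA_spec]
        rw [if_neg (by have := hmin k hk; omega)]
        rw [if_pos]
        by_contra hcon
        push_neg at hcon
        have hlen := pvDotRun_le_length (blocks.drop k)
        have heq : pvDotRun (blocks.drop k) = (blocks.drop k).length := by omega
        rw [List.length_drop] at heq
        have hdrle : pvDotRun (blocks.drop i0) ≤ n - i0 := by
          have := pvDotRun_le_length (blocks.drop i0)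
          rw [List.length_drop] at this
          omega
        have := hmin k hk
        omega
      show pvOuterA blocks L 0 (fp - L).toNat = if (i0 : Int) < fp - L then (i0 : Int) else -1
      by_cases hi0lim : (i0 : Int) < fp - L
      · rw [if_pos hi0lim]
        exact pvOuterA_ret blocks L 0 (fp - L).toNat i0 (by omega) (by omega)
          (by rw [pvInnerA_spec]; rw [if_pos (by constructor <;> omega)])
          (fun k _ hk2 => hfalse k hk2)
      · rw [if_neg hi0lim]
        rw [pvOuterA_all_false]
        intro k _ hk2
        exact hfalse k (by omega)
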